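-- pv_equiv track=rewrite | github.com/hpc-maths/ponio | database/db.py | hash_label
-- ===== SOURCE A (Python) =====
-- def hash_label(label):
--     id = label.lower()
--     replacements = [
--                 (" ","_"),
--                 ("(",""),
--                 (")",""),
--                 (",",""),
--                 ("-",""),
--                 ("/",""),
--             ]
--     for old,new in replacements :
--         id = id.replace(old,new)
--     return id
-- ===== SOURCE B (Python) =====
-- def hash_label(label):
--     return ''.join('_' if c == ' ' else ('' if c in '(),-/' else c)
--                    for c in label.lower())
-- ===== Notes on version B (the rewrite author's own statement) =====
-- stated objective: simpler
-- what changed: Replaces six sequential full-string replace passes with a single character-by-character pass that classifies each lowercased character (space becomes underscore, the five punctuation characters are dropped, the rest kept), exact because no replacement output is a later replacement target.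
import Mathlib
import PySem

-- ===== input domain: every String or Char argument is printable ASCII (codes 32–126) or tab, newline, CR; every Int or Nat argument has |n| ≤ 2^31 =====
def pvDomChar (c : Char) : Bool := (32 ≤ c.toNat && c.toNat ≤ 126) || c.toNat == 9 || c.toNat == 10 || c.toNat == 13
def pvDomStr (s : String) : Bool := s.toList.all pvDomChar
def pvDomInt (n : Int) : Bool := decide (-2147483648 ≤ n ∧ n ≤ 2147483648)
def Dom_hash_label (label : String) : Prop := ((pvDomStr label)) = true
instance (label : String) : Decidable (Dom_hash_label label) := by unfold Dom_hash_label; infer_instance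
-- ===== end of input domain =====

-- B replaces six sequential .replace scans with one per-character classification pass; simpler, same result.


-- ===== PORT A =====
-- id = label.lower(); for old,new in replacements: id = id.replace(old,new); return id
def hash_label (label : String) : String :=
  [(" ", "_"), ("(", ""), (")", ""), (",", ""), ("-", ""), ("/", "")].foldl
    (fun id p => PySem.Str.replace id p.1 p.2) (PySem.Str.lower label)

-- ===== PORT B =====
-- ''.join('_' if c == ' ' else ('' if c in '(),-/' else c) for c in label.lower())
def hash_label_alt (label : String) : String :=
  String.ofList ((PySem.Str.lower label).toList.flatMap
    (fun c => if c = ' ' then ['_'] else if c ∈ ['(', ')', ',', '-', '/'] then [] else [c]))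

-- ===== PRECONDITION & SPEC =====
def Spec_hash_label (label : String) (out : String) : Prop := out = hash_label_alt label
instance (label : String) (out : String) : Decidable (Spec_hash_label label out) := by unfold Spec_hash_label; infer_instance

-- ===== CLAIM (what is proved, stated in full; the proofs are below) =====
def Claim_equal_hash_label : Prop := ∀ (label : String), Dom_hash_label label → Spec_hash_label label (hash_label label)

-- ===== LEMMAS AND PROOFS =====

-- replace with a single-character pattern is a per-character flatMap
theorem replace_go_single (c : Char) (new : List Char) :
    ∀ (l : List Char) (fuel : Nat) (acc : List Char), l.length ≤ fuel →
      PySem.Chars.replace.go [c] new fuel l acc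
        = acc.reverse ++ l.flatMap (fun x => if x = c then new else [x]) := by
  intro l
  induction l with
  | nil => intro fuel acc _; cases fuel <;> simp [PySem.Chars.replace.go]
  | cons x t ih =>
      intro fuel acc h
      cases fuel with
      | zero => simp at h
      | succ n =>
          simp only [PySem.Chars.replace.go]
          by_cases hx : x = c
          · subst hx
            have : List.isPrefixOf [x] (x :: t) = true := by simp [List.isPrefixOf]
            rw [this]
            simp only [if_true, List.length, List.drop]
            rw [ih n (new.reverse ++ acc) (by simpa using Nat.le_of_succ_le_succ h)]
            simp
          · have : List.isPrefixOf [c] (x :: t) = false := by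
              simp [List.isPrefixOf]; exact fun hcx => (hx hcx.symm).elim
            rw [this]
            simp only [Bool.false_eq_true, if_false]
            rw [ih n (x :: acc) (Nat.le_of_succ_le_succ h)]
            simp [hx]

theorem replace_single (s : List Char) (c : Char) (new : List Char) :
    PySem.Chars.replace s [c] new = s.flatMap (fun x => if x = c then new else [x]) := by
  rw [PySem.Chars.replace]
  simp only [List.isEmpty, Bool.false_eq_true, if_false]
  simpa using replace_go_single c new s s.length [] (le_refl _)

-- ===== VERDICT (by name: the statement is the Claim_ definition above) =====
theorem hash_label_spec : Claim_equal_hash_label := by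
  intro label _
  unfold Spec_hash_label
  apply String.toList_injective
  simp only [hash_label, hash_label_alt, List.foldl, PySem.Str.toList_replace,
    PySem.Str.toList_lower, String.toList_ofList]
  rw [show (" " : String).toList = [' '] from rfl, show ("_" : String).toList = ['_'] from rfl,
    show ("(" : String).toList = ['('] from rfl, show (")" : String).toList = [')'] from rfl,
    show ("," : String).toList = [','] from rfl, show ("-" : String).toList = ['-'] from rfl,
    show ("/" : String).toList = ['/'] from rfl, show ("" : String).toList = ([] : List Char) from rfl]
  rw [replace_single, replace_single, replace_single, replace_single, replace_single,
      replace_single]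
  simp only [List.flatMap_assoc]
  congr 1
  funext x
  by_cases h1 : x = ' '; · subst h1; decide
  by_cases h2 : x = '('; · subst h2; decide
  by_cases h3 : x = ')'; · subst h3; decide
  by_cases h4 : x = ','; · subst h4; decide
  by_cases h5 : x = '-'; · subst h5; decide
  by_cases h6 : x = '/'; · subst h6; decide
  simp [h1, h2, h3, h4, h5, h6]
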